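-- pv_equiv track=rewrite | github.com/rtealwitter/Local-Search | approximation.py | getchains
-- ===== SOURCE A (Python) =====
-- import itertools
--
-- def powerset(iterable):
--     "powerset([1,2,3]) --> (,) (1,) (2,) (3,) (1,2) (1,3) (2,3) (1,2,3)"
--     s = list(iterable)
--     return [i for i in itertools.chain.from_iterable(itertools.combinations(s, r) for r in range(len(s)+1))]
--
-- def getchains(current, chain):
--     chains = []
--     for subset in powerset(current):
--         if len(subset) == 0:
--             chains += [[(), current] + chain]
--         elif len(subset) < len(current):
--             chains += getchains(subset, [current]+chain[:])
--     return chains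
-- ===== SOURCE B (Python) =====
-- import itertools
--
-- def getchains(current, chain):
--     # B: factor the suffix `chain` out of the recursion: desc(s) builds all
--     # ascending chains [(), ..., s] once, independent of the suffix; the
--     # caller appends the suffix.  Sizes run only over 1..len-1, so no
--     # per-subset length tests are needed.
--     def desc(s):
--         out = [[(), s]]
--         for r in range(1, len(s)):
--             for sub in itertools.combinations(s, r):
--                 out += [c + [s] for c in desc(sub)]
--         return out
--     result = [[(), current] + chain]
--     for r in range(1, len(current)):
--         for sub in itertools.combinations(current, r):
--             result += [c + [current] + chain for c in desc(sub)]
--     return result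
-- ===== Notes on version B (the rewrite author's own statement) =====
-- stated objective: alternative
-- what changed: B factors the chain suffix out of the recursion: a helper desc(s) enumerates all ascending chains [(), ..., s] once (iterating subset sizes 1..len(s)-1 so the full subset never appears and no per-subset length tests remain), and the caller appends the suffix, instead of A's single recursion threading the growing suffix through every call over the whole powerset.
import Mathlib
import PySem

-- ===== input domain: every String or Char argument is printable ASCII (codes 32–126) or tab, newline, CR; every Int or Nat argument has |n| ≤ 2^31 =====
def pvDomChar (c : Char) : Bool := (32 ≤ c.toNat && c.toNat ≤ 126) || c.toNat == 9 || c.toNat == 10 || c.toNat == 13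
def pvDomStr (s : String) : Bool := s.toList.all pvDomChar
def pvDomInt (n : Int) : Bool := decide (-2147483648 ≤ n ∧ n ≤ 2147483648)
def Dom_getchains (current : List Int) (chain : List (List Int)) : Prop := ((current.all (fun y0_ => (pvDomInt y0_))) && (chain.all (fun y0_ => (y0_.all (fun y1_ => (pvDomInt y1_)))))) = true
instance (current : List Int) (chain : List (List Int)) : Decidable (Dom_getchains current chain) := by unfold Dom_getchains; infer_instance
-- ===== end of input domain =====

-- B enumerates each subset's ascending chains once with a suffix-free helper and appends the
-- chain suffix at the end, instead of A's recursion threading the suffix through the powerset.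

-- ===== PORT A =====
-- itertools.combinations(l, r) in iteration order (lexicographic by position)
def combs : Nat → List Int → List (List Int)
  | 0, _ => [[]]
  | _ + 1, [] => []
  | r + 1, x :: xs => (combs r xs).map (fun c => x :: c) ++ combs (r + 1) xs

-- powerset(l): all combinations, by increasing size 0..len(l)
def powersetP (l : List Int) : List (List Int) :=
  (List.range (l.length + 1)).flatMap (fun r => combs r l)

def getchains (current : List Int) (chain : List (List Int)) : List (List (List Int)) :=
  (powersetP current).foldl
    (fun chains subset =>
      if subset.length = 0 then chains ++ [[[], current] ++ chain]
      else if _h : subset.length < current.length then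
        chains ++ getchains subset ([current] ++ chain)
      else chains) []
termination_by current.length
decreasing_by exact _h


-- each element of combs r l has length r (cited by desc's termination proof)
lemma combs_len : ∀ (r : Nat) (l : List Int), ∀ s ∈ combs r l, s.length = r
  | 0, _ => by simp [combs]
  | _ + 1, [] => by simp [combs]
  | r + 1, x :: xs => by
    intro s hs
    simp only [combs, List.mem_append, List.mem_map] at hs
    rcases hs with ⟨c, hc, rfl⟩ | h
    · simp [combs_len r xs c hc]
    · exact combs_len (r + 1) xs s h
  termination_by _ l => l.length

-- ===== PORT B =====
-- desc s = all ascending chains [[], ..., s]; suffix-independent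
def desc (s : List Int) : List (List (List Int)) :=
  [[[], s]] ++ (List.range' 1 (s.length - 1)).attach.flatMap (fun r =>
    (combs r.1 s).attach.flatMap (fun sub => (desc sub.1).map (fun c => c ++ [s])))
termination_by s.length
decreasing_by
  have h1 := combs_len r.1 s sub.1 sub.2
  have h2 := List.mem_range'.mp r.2
  omega

def getchains_alt (current : List Int) (chain : List (List Int)) : List (List (List Int)) :=
  [[[], current] ++ chain] ++ (List.range' 1 (current.length - 1)).flatMap (fun r =>
    (combs r current).flatMap (fun sub => (desc sub).map (fun c => c ++ [current] ++ chain)))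

-- ===== PRECONDITION & SPEC =====
def Spec_getchains (current : List Int) (chain : List (List Int)) (out : List (List (List Int))) : Prop := out = getchains_alt current chain
instance (current : List Int) (chain : List (List Int)) (out : List (List (List Int))) : Decidable (Spec_getchains current chain out) := by unfold Spec_getchains; infer_instance

-- ===== CLAIM (what is proved, stated in full; the proofs are below) =====
def Claim_equal_getchains : Prop := ∀ (current : List Int) (chain : List (List Int)), Dom_getchains current chain → Spec_getchains current chain (getchains current chain)

-- ===== LEMMAS AND PROOFS =====

-- attach is a proof-only artefact of desc's termination: unfolds to the plain flatMap form
lemma desc_eq (s : List Int) :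
    desc s = [[[], s]] ++ (List.range' 1 (s.length - 1)).flatMap (fun r =>
      (combs r s).flatMap (fun sub => (desc sub).map (fun c => c ++ [s]))) := by
  rw [desc]
  simp

lemma foldl_app {α β : Type} (f : α → List β) (l : List α) (acc : List β) :
    l.foldl (fun a x => a ++ f x) acc = acc ++ l.flatMap f := by
  induction l generalizing acc with
  | nil => simp
  | cons a t ih => simp [ih, List.append_assoc]

lemma getchains_eq_desc : ∀ (n : Nat) (current : List Int), current.length ≤ n →
    ∀ chain, getchains current chain = (desc current).map (fun c => c ++ chain) := by
  intro n
  induction n with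
  | zero =>
    intro current h chain
    have hnil : current = [] := List.length_eq_zero_iff.mp (Nat.le_zero.mp h)
    subst hnil
    rw [getchains, desc_eq]
    simp [powersetP, combs, List.range_succ]
  | succ n ih =>
    intro current hlen chain
    by_cases hnil : current = []
    · subst hnil
      rw [getchains, desc_eq]
      simp [powersetP, combs, List.range_succ]
    · have hpos : 1 ≤ current.length := List.length_pos_iff.mpr hnil
      have hm : current.length = (current.length - 1) + 1 := by omega
      rw [getchains]
      have hbody : (fun (chains : List (List (List Int))) subset =>
          if subset.length = 0 then chains ++ [[[], current] ++ chain]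
          else if _h : subset.length < current.length then
            chains ++ getchains subset ([current] ++ chain)
          else chains)
          = (fun chains subset => chains ++ (if subset.length = 0 then [[[], current] ++ chain]
              else if subset.length < current.length then getchains subset ([current] ++ chain)
              else [])) := by
        funext a s
        split_ifs <;> simp
      rw [hbody, foldl_app]
      have hp : powersetP current
          = [[]] ++ ((List.range' 1 (current.length - 1)).flatMap (fun r => combs r current)
              ++ combs current.length current) := by
        unfold powersetP
        rw [List.range_eq_range']
        rw [show current.length + 1 = (current.length - 1 + 1) + 1 by omega, List.range'_succ,
          List.range'_1_concat]
        simp [combs, List.flatMap_append]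
        rw [show 1 + (current.length - 1) = current.length by omega]
      rw [hp]
      rw [desc_eq current]
      simp only [List.flatMap_append, List.flatMap_cons, List.flatMap_nil, List.nil_append,
        List.map_append, List.map_flatMap, List.map_map, List.length_nil, if_true,
        List.append_nil, List.map_cons, List.map_nil, List.flatMap_assoc]
      have h3 : (combs current.length current).flatMap
          (fun subset => if subset.length = 0 then [[[], current] ++ chain]
            else if subset.length < current.length then getchains subset ([current] ++ chain)
            else []) = [] := by
        refine List.flatMap_eq_nil_iff.mpr ?_
        intro sub hsub
        have hl := combs_len _ _ _ hsub
        rw [if_neg (by omega), if_neg (by omega)]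
      rw [h3, List.append_nil]
      refine congrArg _ (List.flatMap_congr ?_)
      intro r hr
      have hr' := List.mem_range'.mp hr
      refine List.flatMap_congr ?_
      intro sub hsub
      have hl := combs_len _ _ _ hsub
      rw [if_neg (by omega), if_pos (by omega)]
      rw [ih sub (by omega) ([current] ++ chain)]
      refine List.map_congr_left ?_
      intro c _
      simp [List.append_assoc]

lemma alt_eq_desc (current : List Int) (chain : List (List Int)) :
    getchains_alt current chain = (desc current).map (fun c => c ++ chain) := by
  rw [desc_eq current]
  unfold getchains_alt
  simp only [List.map_append, List.map_flatMap, List.map_map, List.map_cons, List.map_nil]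
  refine congrArg _ (List.flatMap_congr ?_)
  intro r _
  refine List.flatMap_congr ?_
  intro sub _
  refine List.map_congr_left ?_
  intro c _
  simp [List.append_assoc]

-- ===== VERDICT (by name: the statement is the Claim_ definition above) =====
theorem getchains_spec : Claim_equal_getchains := by
  intro current chain _
  unfold Spec_getchains
  rw [getchains_eq_desc current.length current le_rfl chain, alt_eq_desc]
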